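-- pv_equiv track=rewrite | github.com/encryptogroup/LUC | create-multi-input-output-circuit.py | get_neighborhood2
-- ===== SOURCE A (Python) =====
-- def get_neighborhood2(layers, node):
--     next_layer = []
--     found = False
--     for l in layers:
--         if found:
--             next_layer = l
--             break
--         if node in l:
--             found = True
--     return next_layer
-- ===== SOURCE B (Python) =====
-- def get_neighborhood2(layers, node):
--     # Build an index mapping each element of a layer to its successor layer
--     # (first occurrence wins), then answer with a single dictionary lookup.
--     succ = {}
--     for prev, nxt in zip(layers, layers[1:]):
--         for x in prev:
--             succ.setdefault(x, nxt)
--     return succ.get(node, [])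
-- ===== Notes on version B (the rewrite author's own statement) =====
-- stated objective: alternative
-- what changed: Replaces A's found-flag scan-and-return-next state machine with a precomputed hash index: B builds a dict mapping every element to its successor layer (setdefault keeps the first layer containing it) and answers by one dict lookup.
import Mathlib
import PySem

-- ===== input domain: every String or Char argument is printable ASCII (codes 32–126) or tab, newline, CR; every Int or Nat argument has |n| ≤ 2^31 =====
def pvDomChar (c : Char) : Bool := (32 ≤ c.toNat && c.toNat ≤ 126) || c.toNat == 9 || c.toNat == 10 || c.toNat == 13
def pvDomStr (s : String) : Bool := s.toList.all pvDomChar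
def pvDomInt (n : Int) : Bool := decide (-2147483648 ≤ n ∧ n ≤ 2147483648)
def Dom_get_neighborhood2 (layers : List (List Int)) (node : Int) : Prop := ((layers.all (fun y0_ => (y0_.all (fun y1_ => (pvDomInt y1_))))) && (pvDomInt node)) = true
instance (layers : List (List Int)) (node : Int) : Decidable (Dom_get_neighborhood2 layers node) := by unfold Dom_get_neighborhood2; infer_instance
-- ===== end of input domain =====

-- B replaces A's found-flag scan with a precomputed successor index (dict built once, one lookup); alternative decomposition, same cost.

-- ===== PORT A =====
-- A's loop with its `found` flag and break, as structural recursion over the layers with the flag as state.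
def get_neighborhood2_go (node : Int) : List (List Int) → Bool → List Int
  | [], _ => []
  | l :: rest, found =>
    if found then l
    else if node ∈ l then get_neighborhood2_go node rest true
    else get_neighborhood2_go node rest false

def get_neighborhood2 (layers : List (List Int)) (node : Int) : List Int :=
  get_neighborhood2_go node layers false

-- ===== PORT B =====
-- B: build `succ` by the two nested loops over zip(layers, layers[1:]) with setdefault, then one lookup.
def get_neighborhood2_alt (layers : List (List Int)) (node : Int) : List Int :=
  let succ : PySem.Dict Int (List Int) :=
    (List.zip layers (PySem.List.slice layers (some 1) none)).foldl
      (fun d pr => pr.1.foldl (fun d x => d.setdefault x pr.2) d) PySem.Dict.empty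
  succ.getD node []

-- ===== PRECONDITION & SPEC =====
def Spec_get_neighborhood2 (layers : List (List Int)) (node : Int) (out : List Int) : Prop := out = get_neighborhood2_alt layers node
instance (layers : List (List Int)) (node : Int) (out : List Int) : Decidable (Spec_get_neighborhood2 layers node out) := by unfold Spec_get_neighborhood2; infer_instance

-- ===== CLAIM (what is proved, stated in full; the proofs are below) =====
def Claim_equal_get_neighborhood2 : Prop := ∀ (layers : List (List Int)) (node : Int), Dom_get_neighborhood2 layers node → Spec_get_neighborhood2 layers node (get_neighborhood2 layers node)

-- ===== LEMMAS AND PROOFS =====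

-- first successor layer among consecutive pairs (proof-side characterisation)
def gn2First (node : Int) : List (List Int × List Int) → Option (List Int)
  | [] => none
  | (p, n) :: rest => if node ∈ p then some n else gn2First node rest

theorem get?_setdefault (d : PySem.Dict Int (List Int)) (k x : Int) (v : List Int) :
    (d.setdefault k v).get? x = (d.get? x).or (if x = k then some v else none) := by
  unfold PySem.Dict.setdefault
  by_cases hc : d.contains k = true
  · simp only [hc, if_true]
    by_cases hx : x = k
    · subst hx
      have hs : (d.get? x).isSome := by rw [← PySem.Dict.contains_eq_isSome_get?]; exact hc
      cases hg : d.get? x with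
      | none => rw [hg] at hs; simp at hs
      | some w => simp
    · simp [hx]
  · simp only [hc]
    show (List.find? (fun p => p.1 == x) (d.items ++ [(k, v)])).map (·.2) = _
    rw [List.find?_append]
    cases h : List.find? (fun p => p.1 == x) d.items with
    | some w => simp [PySem.Dict.get?, h]
    | none =>
      by_cases hx : x = k
      · subst hx; simp [PySem.Dict.get?, h]
      · simp [PySem.Dict.get?, h, hx]
        omega

theorem inner_fold_get? (node : Int) (nxt : List Int) :
    ∀ (l : List Int) (d : PySem.Dict Int (List Int)),
      ((l.foldl (fun d x => d.setdefault x nxt) d).get? node)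
        = (d.get? node).or (if node ∈ l then some nxt else none) := by
  intro l
  induction l with
  | nil => intro d; simp
  | cons x xs ih =>
    intro d
    simp only [List.foldl_cons, ih, get?_setdefault, Option.or_assoc]
    by_cases hx : node = x
    · simp [hx]
    · simp [hx, List.mem_cons]

theorem outer_fold_get? (node : Int) :
    ∀ (pairs : List (List Int × List Int)) (d : PySem.Dict Int (List Int)),
      ((pairs.foldl (fun d pr => pr.1.foldl (fun d x => d.setdefault x pr.2) d) d).get? node)
        = (d.get? node).or (gn2First node pairs) := by
  intro pairs
  induction pairs with
  | nil => intro d; simp [gn2First]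
  | cons pr rest ih =>
    intro d
    simp only [List.foldl_cons, ih, inner_fold_get?, Option.or_assoc, gn2First]
    by_cases h : node ∈ pr.1 <;> simp [h]

theorem go_eq_first (node : Int) : ∀ (layers : List (List Int)),
    get_neighborhood2_go node layers false
      = (gn2First node (List.zip layers layers.tail)).getD [] := by
  intro layers
  induction layers with
  | nil => rfl
  | cons l rest ih =>
    cases rest with
    | nil =>
      by_cases h : node ∈ l <;> simp [get_neighborhood2_go, h, gn2First]
    | cons c r =>
      by_cases h : node ∈ l
      · simp [get_neighborhood2_go, h, gn2First]
      · rw [show get_neighborhood2_go node (l :: c :: r) false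
              = get_neighborhood2_go node (c :: r) false from by simp [get_neighborhood2_go, h], ih]
        simp [gn2First, h]

-- ===== VERDICT (by name: the statement is the Claim_ definition above) =====
theorem get_neighborhood2_spec : Claim_equal_get_neighborhood2 := by
  intro layers node _
  unfold Spec_get_neighborhood2 get_neighborhood2 get_neighborhood2_alt
  rw [PySem.List.slice_from_one, PySem.Dict.getD_eq_get?_getD, outer_fold_get?]
  simp [go_eq_first]
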